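-- pv_equiv track=rewrite | github.com/diasasalways/ubs_coding_challenge | app.py | inverse_encode_index_parity
-- ===== SOURCE A (Python) =====
-- from typing import Any, Dict, List, Tuple, Optional, Set
--
-- def _split_words_preserve_spaces(s: str) -> List[str]:
--     # Split by single spaces, collapse multiple spaces to single between tokens as per challenge simplicity
--     # We assume inputs are standard spaced phrases
--     return s.split(" ")
--
-- def inverse_encode_index_parity(s: str) -> str:
--     def inv_tok(tok: str) -> str:
--         n = len(tok)
--         ev_len = (n + 1) // 2
--         ev = tok[:ev_len]
--         od = tok[ev_len:]
--         res = []
--         for i in range(ev_len):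
--             res.append(ev[i])
--             j = i
--             if j < len(od):
--                 res.append(od[j])
--         return ''.join(res)
--     parts = _split_words_preserve_spaces(s)
--     return " ".join(inv_tok(p) for p in parts)
-- ===== SOURCE B (Python) =====
-- def inverse_encode_index_parity(s: str) -> str:
--     def inv_tok(tok: str) -> str:
--         k = (len(tok) + 1) // 2
--         a, b = tok[:k], tok[k:]
--         out = []
--         while a:
--             out.append(a[0])
--             a, b = b, a[1:]
--         return ''.join(out)
--     return " ".join(inv_tok(p) for p in s.split(" "))
-- ===== Notes on version B (the rewrite author's own statement) =====
-- stated objective: simpler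
-- what changed: The per-token inverse replaces the index loop with its range/bounds test by a two-list swap-consume interleave (take the head of the longer half, then swap the halves), removing all index arithmetic.
import Mathlib
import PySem

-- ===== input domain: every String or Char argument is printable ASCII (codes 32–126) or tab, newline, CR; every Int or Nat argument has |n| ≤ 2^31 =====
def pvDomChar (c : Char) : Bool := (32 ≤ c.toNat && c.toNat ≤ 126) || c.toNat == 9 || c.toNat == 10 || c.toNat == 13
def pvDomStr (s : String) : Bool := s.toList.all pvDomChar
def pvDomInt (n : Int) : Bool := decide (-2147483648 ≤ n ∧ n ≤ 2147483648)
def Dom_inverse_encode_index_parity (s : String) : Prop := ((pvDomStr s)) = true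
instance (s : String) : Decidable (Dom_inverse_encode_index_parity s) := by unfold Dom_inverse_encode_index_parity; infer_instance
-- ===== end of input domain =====

-- B replaces A's per-token index loop (with its bounds test) by a two-list
-- swap-consume interleave; objective: simpler. Equivalence is total.

-- ===== PORT A =====
-- helper _split_words_preserve_spaces: s.split(" "); sep ≠ "" so split? is some
def pvSplitWordsPreserveSpaces (s : String) : List String :=
  (PySem.Str.split? s " ").getD []

-- inv_tok: Python's ev[i]/od[i] indices are always in range, so they are ported
-- as pyGetD with an unreachable default.
def pvInvTokA (tok : String) : String :=
  let n : Int := (PySem.Str.len tok : Int)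
  let ev_len : Int := PySem.Int.floordiv (n + 1) 2
  let ev : List Char := PySem.List.slice tok.toList none (some ev_len)
  let od : List Char := PySem.List.slice tok.toList (some ev_len) none
  let res : List Char := (PySem.List.pyRange 0 ev_len 1).foldl (fun res i =>
    let res := res ++ [PySem.List.pyGetD ev i ' ']
    if i < (od.length : Int) then res ++ [PySem.List.pyGetD od i ' '] else res) []
  String.ofList res

def inverse_encode_index_parity (s : String) : String :=
  PySem.Str.join " " ((pvSplitWordsPreserveSpaces s).map pvInvTokA)

-- ===== PORT B =====
-- while a: out.append(a[0]); a, b = b, a[1:]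
def pvInterleave : List Char → List Char → List Char
  | [], _ => []
  | c :: a, b => c :: pvInterleave b a
termination_by a b => a.length + b.length

def pvInvTokB (tok : String) : String :=
  let k : Nat := (tok.toList.length + 1) / 2
  String.ofList (pvInterleave (tok.toList.take k) (tok.toList.drop k))

def inverse_encode_index_parity_alt (s : String) : String :=
  PySem.Str.join " " (((PySem.Str.split? s " ").getD []).map pvInvTokB)

-- ===== PRECONDITION & SPEC =====
def Spec_inverse_encode_index_parity (s : String) (out : String) : Prop := out = inverse_encode_index_parity_alt s
instance (s : String) (out : String) : Decidable (Spec_inverse_encode_index_parity s out) := by unfold Spec_inverse_encode_index_parity; infer_instance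

-- ===== CLAIM (what is proved, stated in full; the proofs are below) =====
def Claim_equal_inverse_encode_index_parity : Prop := ∀ (s : String), Dom_inverse_encode_index_parity s → Spec_inverse_encode_index_parity s (inverse_encode_index_parity s)

-- ===== LEMMAS AND PROOFS =====

-- A's index loop, restated over Nat indices, equals the swap-consume interleave.
theorem pv_fold_eq_interleave (od : List Char) : ∀ (ev : List Char) (acc : List Char),
    od.length ≤ ev.length → ev.length ≤ od.length + 1 →
    (List.range ev.length).foldl (fun res k =>
        let r := res ++ [ev.getD k ' ']
        if k < od.length then r ++ [od.getD k ' '] else r) acc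
      = acc ++ pvInterleave ev od := by
  induction od with
  | nil =>
    intro ev acc h1 h2
    match ev, h2 with
    | [], _ => simp [pvInterleave]
    | [c], _ => simp [pvInterleave, List.range_succ]
  | cons d od' ih =>
    intro ev acc h1 h2
    match ev with
    | [] => simp at h1
    | c :: ev' =>
      simp only [List.length_cons, List.range_succ_eq_map, List.foldl_cons, List.foldl_map]
      simp only [List.getD_cons_zero, List.getD_cons_succ,
        Nat.succ_lt_succ_iff, Nat.zero_lt_succ, if_pos]
      rw [ih ev' _ (by simpa using h1) (by simpa using h2)]
      simp [pvInterleave]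

-- the two per-token inverses agree on every token
theorem pv_tok_eq (tok : String) : pvInvTokA tok = pvInvTokB tok := by
  simp only [pvInvTokA, pvInvTokB, PySem.Str.len_eq]
  generalize tok.toList = cs
  have hfd : PySem.Int.floordiv ((cs.length : Int) + 1) 2 = (((cs.length + 1) / 2 : Nat) : Int) := by
    rw [show ((cs.length : Int) + 1) = ((cs.length + 1 : Nat) : Int) by push_cast; ring]
    exact_mod_cast PySem.Int.floordiv_natCast (cs.length + 1) 2
  rw [hfd]
  set n := cs.length with hn
  set m := (n + 1) / 2 with hm
  simp only [PySem.List.slice_to_natCast, PySem.List.slice_from_natCast]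
  have htk : (cs.take m).length = m := by rw [List.length_take]; omega
  have hdr : (cs.drop m).length = n - m := by rw [List.length_drop]
  have key := pv_fold_eq_interleave (cs.drop m) (cs.take m) []
      (by rw [htk, hdr]; omega) (by rw [htk, hdr]; omega)
  rw [htk, List.nil_append] at key
  rw [PySem.List.pyRange_one]
  simp only [Int.sub_zero, Int.toNat_natCast, List.foldl_map]
  refine congrArg String.ofList ?_
  rw [← key]
  congr 1
  funext res k
  simp only [zero_add, PySem.List.pyGetD_natCast, Nat.cast_lt]

-- ===== VERDICT (by name: the statement is the Claim_ definition above) =====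
theorem inverse_encode_index_parity_spec : Claim_equal_inverse_encode_index_parity := by
  intro s _
  unfold Spec_inverse_encode_index_parity inverse_encode_index_parity inverse_encode_index_parity_alt pvSplitWordsPreserveSpaces
  exact congrArg _ (List.map_congr_left (fun tok _ => pv_tok_eq tok))
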